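-- pv_equiv track=rewrite | github.com/itsmemdtofik/Python | Arrays/Medium/MinMoveToEqualizeArray.py | minimumMovesToEqualizeII
-- ===== SOURCE A (Python) =====
-- def minimumMovesToEqualizeII(nums: list[int]) -> int:
--     if not nums:
--         return 0
--
--     nums.sort()
--     minimumValue = nums[0]
--     moves = 0
--
--     for num in nums:
--         moves += num - minimumValue
--
--     return moves
-- ===== SOURCE B (Python) =====
-- def minimumMovesToEqualizeII(nums: list[int]) -> int:
--     # Gap-weighted pass: sort in place (same mutation as A), then add each
--     # consecutive gap times the number of elements lying above it.
--     nums.sort()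
--     total = 0
--     n = len(nums)
--     for i in range(1, n):
--         total += (nums[i] - nums[i - 1]) * (n - i)
--     return total
-- ===== Notes on version B (the rewrite author's own statement) =====
-- stated objective: alternative
-- what changed: Instead of subtracting the minimum from every element, B walks adjacent pairs of the sorted list and accumulates each consecutive gap weighted by the number of elements above it; it also drops A's empty-list guard (the loop naturally yields 0).
import Mathlib
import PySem

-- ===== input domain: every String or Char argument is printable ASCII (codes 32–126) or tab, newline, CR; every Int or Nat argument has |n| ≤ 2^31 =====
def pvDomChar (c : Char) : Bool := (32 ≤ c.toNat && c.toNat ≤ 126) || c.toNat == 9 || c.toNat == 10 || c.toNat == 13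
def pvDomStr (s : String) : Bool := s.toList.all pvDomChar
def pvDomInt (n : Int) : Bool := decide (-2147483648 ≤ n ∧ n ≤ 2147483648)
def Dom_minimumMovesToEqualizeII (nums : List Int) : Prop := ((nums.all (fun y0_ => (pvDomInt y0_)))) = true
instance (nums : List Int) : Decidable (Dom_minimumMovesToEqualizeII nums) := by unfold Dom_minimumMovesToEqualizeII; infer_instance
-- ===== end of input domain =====

-- Header: B sums consecutive gaps of the sorted list weighted by the count of elements
-- above them, instead of subtracting the minimum from each element; both sort nums in
-- place in Python, so the mutation side effect is the same.

-- ===== PORT A =====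
def minimumMovesToEqualizeII (nums : List Int) : Int :=
  if nums = [] then 0
  else
    let s := PySem.List.sorted nums (fun x => x) false
    -- nums[0] after the sort; s is nonempty here so pyGet? returns some
    let minimumValue := (PySem.List.pyGet? s 0).getD 0
    s.foldl (fun moves num => moves + (num - minimumValue)) 0

-- ===== PORT B =====
def minimumMovesToEqualizeII_alt (nums : List Int) : Int :=
  let s := PySem.List.sorted nums (fun x => x) false
  let n : Int := s.length
  (PySem.List.pyRange 1 n 1).foldl
    (fun total i =>
      total + (PySem.List.pyGetD s i 0 - PySem.List.pyGetD s (i - 1) 0) * (n - i)) 0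

-- ===== PRECONDITION & SPEC =====
def Spec_minimumMovesToEqualizeII (nums : List Int) (out : Int) : Prop := out = minimumMovesToEqualizeII_alt nums
instance (nums : List Int) (out : Int) : Decidable (Spec_minimumMovesToEqualizeII nums out) := by unfold Spec_minimumMovesToEqualizeII; infer_instance

-- ===== CLAIM =====
def Claim_equal_minimumMovesToEqualizeII : Prop := ∀ (nums : List Int), Dom_minimumMovesToEqualizeII nums → Spec_minimumMovesToEqualizeII nums (minimumMovesToEqualizeII nums)

-- ===== LEMMAS AND PROOFS =====

-- Re-basing a sum of differences from a to b shifts it by length * (b - a).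
theorem pv_sum_map_shift (t : List Int) (a b : Int) :
    (t.map (fun x => x - a)).sum = (t.map (fun x => x - b)).sum + (t.length : Int) * (b - a) := by
  induction t with
  | nil => simp
  | cons c u ihu =>
    simp only [List.map_cons, List.sum_cons, List.length_cons]
    push_cast
    linarith

-- Nat-indexed telescoping identity: gap-weighted sum over a::t equals Σ_{x∈t} (x - a).
theorem pv_gapsum_nat (t : List Int) : ∀ (a : Int),
    ((List.range t.length).map
      (fun k => (t.getD k 0 - (a :: t).getD k 0) * ((t.length : Int) - k))).sum
    = (t.map (fun x => x - a)).sum := by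
  induction t with
  | nil => intro a; simp
  | cons b t' ih =>
    intro a
    rw [List.length_cons, List.range_succ_eq_map]
    simp only [List.map_cons, List.map_map, List.sum_cons]
    have hshift :
        ((List.range t'.length).map
          ((fun k => ((b :: t').getD k 0 - (a :: b :: t').getD k 0) *
              (((t'.length + 1 : Nat) : Int) - k)) ∘ Nat.succ)).sum
        = ((List.range t'.length).map
          (fun k => (t'.getD k 0 - (b :: t').getD k 0) * ((t'.length : Int) - k))).sum := by
      apply congrArg
      apply List.map_congr_left
      intro k _
      simp only [Function.comp, List.getD_cons_succ]
      push_cast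
      ring_nf
    rw [hshift, ih b]
    have hsplit := pv_sum_map_shift t' a b
    simp only [List.getD_cons_zero]
    push_cast
    linarith

-- Gap-weighted fold over pyRange 1 n equals Σ_{x∈s} (x - head s) for s = a :: t.
theorem pv_gapsum (a : Int) (t : List Int) :
    ((PySem.List.pyRange 1 ((a :: t).length : Int) 1).map
      (fun i => (PySem.List.pyGetD (a :: t) i 0 - PySem.List.pyGetD (a :: t) (i - 1) 0) *
        (((a :: t).length : Int) - i))).sum
    = (t.map (fun x => x - a)).sum := by
  rw [PySem.List.pyRange_one]
  have hlen : (((a :: t).length : Int) - 1).toNat = t.length := by simp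
  rw [hlen, List.map_map]
  rw [← pv_gapsum_nat t a]
  apply congrArg
  apply List.map_congr_left
  intro k hk
  have hk' : k < t.length := List.mem_range.mp hk
  have h1 : (1 : Int) + (k : Int) = ((k + 1 : Nat) : Int) := by push_cast; ring
  simp only [Function.comp, h1]
  rw [PySem.List.pyGetD_natCast]
  have h2 : ((k + 1 : Nat) : Int) - 1 = ((k : Nat) : Int) := by push_cast; ring
  rw [h2, PySem.List.pyGetD_natCast]
  simp only [List.getD_cons_succ, List.length_cons]
  push_cast
  ring_nf

-- ===== VERDICT =====
theorem minimumMovesToEqualizeII_spec : Claim_equal_minimumMovesToEqualizeII := by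
  intro nums _
  unfold Spec_minimumMovesToEqualizeII minimumMovesToEqualizeII minimumMovesToEqualizeII_alt
  by_cases h : nums = []
  · subst h
    simp [PySem.List.sorted, PySem.List.pyRange_one_eq_nil]
  · simp only [h, if_false]
    cases hs : PySem.List.sorted nums (fun x => x) false with
    | nil =>
      exact absurd ((PySem.List.sorted_eq_nil_iff nums (fun x => x) false).mp hs) h
    | cons h0 t =>
      have hget : PySem.List.pyGet? (h0 :: t) 0 = some h0 := by
        simp [PySem.List.pyGet?, PySem.List.pyIdx?]
      rw [hget]
      simp only [Option.getD_some]
      rw [PySem.List.foldl_add (g := fun x => x - h0)]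
      rw [PySem.List.foldl_add
        (g := fun i => (PySem.List.pyGetD (h0 :: t) i 0 - PySem.List.pyGetD (h0 :: t) (i - 1) 0) *
          (((h0 :: t).length : Int) - i))]
      rw [pv_gapsum h0 t]
      simp
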